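-- pv_equiv track=rewrite | github.com/ecw74/advent-of-code | 2023/day-07/part-1.py | sort_by_frequency_and_strength
-- ===== SOURCE A (Python) =====
-- def sort_by_frequency_and_strength(s):
--     """
--     Sorts the characters in a string based on their frequency and a predefined strength order.
--     Characters with higher frequency come first. If frequencies are equal, characters are sorted
--     by the strength order 'AKQJT98765432'.
--
--     Args:
--     s (str): The string to be sorted.
--
--     Returns:
--     str: The sorted string.
--
--     Examples:
--     >>> sort_by_frequency_and_strength("32T3K")
--     '33KT2'
--     >>> sort_by_frequency_and_strength("T55J5")
--     '555JT'
--     >>> sort_by_frequency_and_strength("KK677")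
--     'KK776'
--     >>> sort_by_frequency_and_strength("KTJJT")
--     'JJTTK'
--     >>> sort_by_frequency_and_strength("QQQJA")
--     'QQQAJ'
--     """
--
--     # Define the strength order
--     strength_order = "AKQJT98765432"
--
--     # Count the frequency of each character
--     char_frequency = {}
--     for char in s:
--         if char in char_frequency:
--             char_frequency[char] += 1
--         else:
--             char_frequency[char] = 1
--
--     # Sort the characters first by frequency (descending) and then by strength
--     sorted_chars = sorted(char_frequency.keys(), key=lambda x: (-char_frequency[x], strength_order.index(x)))
--
--     # Build the final sorted string
--     sorted_string = ''.join([char * char_frequency[char] for char in sorted_chars])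
--
--     return sorted_string
-- ===== SOURCE B (Python) =====
-- def sort_by_frequency_and_strength(s):
--     # Counting/bucket sort: one slot per strength index, then scan frequency levels descending.
--     order = "AKQJT98765432"
--     counts = {}
--     for ch in s:
--         counts[ch] = counts.get(ch, 0) + 1
--     buckets = [''] * len(order)
--     for ch, cnt in counts.items():
--         buckets[order.index(ch)] = ch * cnt
--     top = max(counts.values()) if counts else 0
--     out = []
--     for level in range(top, 0, -1):
--         for piece in buckets:
--             if len(piece) == level:
--                 out.append(piece)
--     return ''.join(out)
-- ===== Notes on version B (the rewrite author's own statement) =====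
-- stated objective: alternative
-- what changed: Replaces the comparison sort of distinct characters under a (-frequency, strength-index) tuple key by a counting/bucket pass: for each frequency level from the maximum count down to 1, emit the alphabet characters having exactly that count, in the fixed strength order.
import Mathlib
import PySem

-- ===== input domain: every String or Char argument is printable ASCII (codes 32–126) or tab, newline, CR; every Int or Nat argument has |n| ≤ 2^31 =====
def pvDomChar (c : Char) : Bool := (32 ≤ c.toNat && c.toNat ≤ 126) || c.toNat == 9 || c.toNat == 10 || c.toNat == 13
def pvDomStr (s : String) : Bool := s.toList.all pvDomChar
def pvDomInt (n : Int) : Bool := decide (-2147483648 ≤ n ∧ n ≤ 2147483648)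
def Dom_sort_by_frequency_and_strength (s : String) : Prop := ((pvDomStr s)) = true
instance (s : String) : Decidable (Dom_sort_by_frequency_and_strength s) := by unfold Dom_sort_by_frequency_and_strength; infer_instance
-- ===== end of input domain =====

-- B replaces A's comparison sort of the distinct characters by a counting/bucket pass
-- over frequency levels (alternative algorithm; equal return value on Pre_).


-- ===== PORT A =====
-- strength_order = "AKQJT98765432" (ported on the char-list side)
def strengthOrder : List Char := ['A','K','Q','J','T','9','8','7','6','5','4','3','2']

-- port of A: count in a dict (if char in d: d[char]+=1 else d[char]=1), sort the keys by the
-- tuple key (-freq, strength_order.index(x)) (.index ported via PySem.Chars.find, which is -1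
-- exactly where Python's .index raises ValueError — those inputs are outside Pre_), join char*freq.
def sort_by_frequency_and_strength (s : String) : String :=
  let d : PySem.Dict Char Int :=
    s.toList.foldl (fun d ch => if d.contains ch then d.modify ch 0 (· + 1) else d.insert ch 1)
      PySem.Dict.empty
  let sortedChars : List Char :=
    PySem.List.sorted2 d.keys (fun x => -(d.getD x 0)) (fun x => PySem.Chars.find strengthOrder [x])
  String.ofList (PySem.Chars.join [] (sortedChars.map (fun c => PySem.List.pyRepeat [c] (d.getD c 0))))

-- ===== PORT B =====
-- port of B: counts[ch] = counts.get(ch, 0) + 1; then bucket pass: for level in range(top, 0, -1),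
-- for ch in the fixed strength order, if counts.get(ch) == level append ch*level; join.
def sort_by_frequency_and_strength_alt (s : String) : String :=
  let counts : PySem.Dict Char Int :=
    s.toList.foldl (fun d ch => d.insert ch (d.getD ch 0 + 1)) PySem.Dict.empty
  -- buckets[order.index(ch)] = ch * cnt ('.index' ported via Chars.find: nonnegative and in range
  -- exactly on Pre_, where Python's .index returns; '.set' is Python's item assignment there)
  let buckets : List (List Char) :=
    counts.items.foldl (fun b p =>
        b.set (PySem.Chars.find strengthOrder [p.1]).toNat (PySem.List.pyRepeat [p.1] p.2))
      (List.replicate strengthOrder.length [])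
  let top : Int := if counts.size = 0 then 0 else (PySem.List.max? counts.values (fun v => v)).getD 0
  let out : List (List Char) :=
    (PySem.List.pyRange top 0 (-1)).foldl (fun acc lvl =>
      buckets.foldl (fun acc piece => if PySem.List.len piece == lvl then acc ++ [piece] else acc) acc) []
  String.ofList (PySem.Chars.join [] out)

-- ===== PRECONDITION & SPEC =====
-- Pre_ excludes exactly the strings containing a character outside "AKQJT98765432": on those
-- A raises ValueError (strength_order.index), so A returns no value there.
def Pre_sort_by_frequency_and_strength (s : String) : Prop := s.toList.all (fun c => strengthOrder.contains c) = true
instance (s : String) : Decidable (Pre_sort_by_frequency_and_strength s) := by unfold Pre_sort_by_frequency_and_strength; infer_instance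
def pvWitness_sort_by_frequency_and_strength : String := "32T3K"

def Spec_sort_by_frequency_and_strength (s : String) (out : String) : Prop := out = sort_by_frequency_and_strength_alt s
instance (s : String) (out : String) : Decidable (Spec_sort_by_frequency_and_strength s out) := by unfold Spec_sort_by_frequency_and_strength; infer_instance

-- ===== CLAIM (what is proved, stated in full; the proofs are below) =====
def Claim_equal_sort_by_frequency_and_strength : Prop := ∀ (s : String), Dom_sort_by_frequency_and_strength s → Pre_sort_by_frequency_and_strength s → Spec_sort_by_frequency_and_strength s (sort_by_frequency_and_strength s)

-- ===== LEMMAS AND PROOFS =====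

-- the single Int key encoding A's tuple key (-freq, strength index) lexicographically
-- (valid because the strength index lies in [0, 13) on Pre_)
def combKey (d : PySem.Dict Char Int) (c : Char) : Int :=
  -(d.getD c 0) * 13 + PySem.Chars.find strengthOrder [c]

-- L1: insertBy only inspects `before x y` for y in acc
lemma insertBy_congr_mem {α : Type} (b1 b2 : α → α → Bool) (x : α) (acc : List α)
    (h : ∀ y ∈ acc, b1 x y = b2 x y) :
    PySem.List.insertBy b1 x acc = PySem.List.insertBy b2 x acc := by
  induction acc with
  | nil => rfl
  | cons y ys ih =>
    simp only [PySem.List.insertBy]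
    rw [h y (by simp)]
    by_cases hb : b2 x y = true
    · simp [hb]
    · simp [hb]; exact ih (fun z hz => h z (by simp [hz]))

-- L2: foldl insertBy congruence on a predicate closed set
lemma foldl_insertBy_congr {α : Type} (S : α → Prop) (b1 b2 : α → α → Bool)
    (hb : ∀ a b, S a → S b → b1 a b = b2 a b) :
    ∀ (xs acc : List α), (∀ x ∈ xs, S x) → (∀ y ∈ acc, S y) →
    xs.foldl (fun acc x => PySem.List.insertBy b1 x acc) acc
      = xs.foldl (fun acc x => PySem.List.insertBy b2 x acc) acc := by
  intro xs
  induction xs with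
  | nil => intro acc _ _; rfl
  | cons x xs ih =>
    intro acc hxs hacc
    simp only [List.foldl_cons]
    rw [insertBy_congr_mem b1 b2 x acc (fun y hy => hb x y (hxs x (by simp)) (hacc y hy))]
    exact ih _ (fun z hz => hxs z (by simp [hz]))
      (fun y hy => by
        rcases (PySem.List.mem_insertBy _ _ _ _).1 hy with h | h
        · exact h ▸ hxs x (by simp)
        · exact hacc y h)

set_option maxRecDepth 2000 in
lemma findBounds : ∀ c ∈ strengthOrder, 0 ≤ PySem.Chars.find strengthOrder [c] ∧ PySem.Chars.find strengthOrder [c] < 13 := by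
  intro c hc; fin_cases hc <;> decide

-- L3: sorted2 with keys k1, find equals sorted with combKey, on lists inside strengthOrder
lemma lt_eq_comb (d : PySem.Dict Char Int) (a b : Char) (ha : a ∈ strengthOrder) (hb : b ∈ strengthOrder) :
    (decide (-(d.getD a 0) < -(d.getD b 0)) ||
      (!decide (-(d.getD b 0) < -(d.getD a 0)) && decide (PySem.Chars.find strengthOrder [a] < PySem.Chars.find strengthOrder [b])))
    = decide (combKey d a < combKey d b) := by
  have hA := findBounds a ha
  have hB := findBounds b hb
  unfold combKey
  by_cases h1 : -(d.getD a 0) < -(d.getD b 0)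
  · simp [h1]; omega
  · by_cases h2 : -(d.getD b 0) < -(d.getD a 0)
    · simp [h1, h2]; omega
    · by_cases h3 : PySem.Chars.find strengthOrder [a] < PySem.Chars.find strengthOrder [b]
      · simp [h1, h2, h3]; omega
      · simp [h1, h2, h3]; omega

lemma sorted2_eq_sorted_comb (d : PySem.Dict Char Int) (ks : List Char) (hks : ∀ c ∈ ks, c ∈ strengthOrder) :
    PySem.List.sorted2 ks (fun x => -(d.getD x 0)) (fun x => PySem.Chars.find strengthOrder [x])
      = PySem.List.sorted ks (combKey d) false := by
  rw [PySem.List.sorted_eq_foldl_insertBy]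
  show ks.foldl (fun acc x => PySem.List.insertBy _ x acc) [] = _
  exact foldl_insertBy_congr (· ∈ strengthOrder) _ _
    (fun a b ha hb => lt_eq_comb d a b ha hb) ks [] hks (by simp)

set_option maxRecDepth 2000 in
lemma findPairwise : strengthOrder.Pairwise (fun a b => PySem.Chars.find strengthOrder [a] < PySem.Chars.find strengthOrder [b]) := by
  decide

-- the bucket key list B traverses
def target (d : PySem.Dict Char Int) (top : Int) : List Char :=
  (PySem.List.pyRange top 0 (-1)).flatMap (fun lvl => strengthOrder.filter (fun c => d.get? c == some lvl))

-- A-side count dict is counter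
lemma countA_eq (cs : List Char) :
    cs.foldl (fun d ch => if d.contains ch then d.modify ch 0 (· + 1) else d.insert ch 1) PySem.Dict.empty
      = PySem.Dict.counter cs := by
  rw [PySem.Dict.counter_eq_foldl]
  apply PySem.List.foldl_congr_mem
  intro d ch _
  by_cases h : d.contains ch = true
  · simp [h]
  · rw [if_neg h, PySem.Dict.modify, PySem.Dict.getD_of_not_contains _ _ (by simpa using h)]
    norm_num

-- get? on counter
lemma get?_counter_eq (cs : List Char) (c : Char) (v : Int) :
    (PySem.Dict.counter cs).get? c = some v ↔ c ∈ PySem.Set.ofList cs ∧ (cs.count c : Int) = v := by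
  rw [PySem.Dict.get?_eq_some_iff_mem_items _ _ _ (PySem.Dict.nodup_keys_counter cs),
    PySem.Dict.items_counter]
  simp only [List.mem_map, Prod.mk.injEq]
  constructor
  · rintro ⟨k, hk, rfl, rfl⟩; exact ⟨hk, rfl⟩
  · rintro ⟨hc, rfl⟩; exact ⟨c, hc, rfl, rfl⟩

lemma values_counter (cs : List Char) :
    (PySem.Dict.counter cs).values = (PySem.Set.ofList cs).map (fun k => (cs.count k : Int)) := by
  rw [PySem.Dict.values_eq_map_keys _ (PySem.Dict.nodup_keys_counter cs) 0, PySem.Dict.keys_counter]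
  exact List.map_congr_left (fun k _ => by rw [PySem.Dict.getD_counter])

-- facts about top
lemma top_facts (cs : List Char) (hne : cs ≠ []) :
    let d := PySem.Dict.counter cs
    let top := (PySem.List.max? d.values (fun v => v)).getD 0
    (∀ c ∈ PySem.Set.ofList cs, (cs.count c : Int) ≤ top) ∧ 1 ≤ top := by
  intro d top
  have hvals : d.values = (PySem.Set.ofList cs).map (fun k => (cs.count k : Int)) := values_counter cs
  have hvne : d.values ≠ [] := by
    rw [hvals]
    simp only [ne_eq, List.map_eq_nil_iff]
    intro h
    rcases List.exists_mem_of_ne_nil cs hne with ⟨x, hx⟩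
    have := (PySem.Set.mem_ofList cs x).2 hx
    simp [h] at this
  obtain ⟨m, hm⟩ : ∃ m, PySem.List.max? d.values (fun v => v) = some m := by
    cases h : PySem.List.max? d.values (fun v => v) with
    | none => exact absurd ((PySem.List.max?_eq_none_iff _ _).1 h) hvne
    | some m => exact ⟨m, rfl⟩
  have htop : top = m := by simp [top, hm]
  have hmax := PySem.List.max?_isMax hm
  constructor
  · intro c hc
    rw [htop]
    exact hmax _ (by rw [hvals]; exact List.mem_map_of_mem hc)
  · rw [htop]
    have hmmem := PySem.List.max?_mem hm
    rw [hvals] at hmmem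
    rcases List.mem_map.1 hmmem with ⟨k, hk, rfl⟩
    have : 0 < cs.count k := List.count_pos_iff.2 ((PySem.Set.mem_ofList cs k).1 hk)
    omega

-- membership in target
lemma mem_target (cs : List Char) (hpre : ∀ c ∈ cs, c ∈ strengthOrder) (top : Int)
    (htop : ∀ c ∈ PySem.Set.ofList cs, (cs.count c : Int) ≤ top) (c : Char) :
    c ∈ target (PySem.Dict.counter cs) top ↔ c ∈ PySem.Set.ofList cs := by
  unfold target
  simp only [List.mem_flatMap, List.mem_filter, beq_iff_eq, PySem.List.mem_pyRange_neg_one]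
  constructor
  · rintro ⟨lvl, _, _, hget⟩
    exact ((get?_counter_eq cs c lvl).1 hget).1
  · intro hc
    refine ⟨(cs.count c : Int), ⟨?_, htop c hc⟩, hpre c ((PySem.Set.mem_ofList cs c).1 hc), ?_⟩
    · have : 0 < cs.count c := List.count_pos_iff.2 ((PySem.Set.mem_ofList cs c).1 hc)
      omega
    · exact (get?_counter_eq cs c _).2 ⟨hc, rfl⟩

-- pairwise strict combKey on target
lemma pairwise_target (cs : List Char) (top : Int) :
    (target (PySem.Dict.counter cs) top).Pairwise
      (fun a b => combKey (PySem.Dict.counter cs) a < combKey (PySem.Dict.counter cs) b) := by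
  unfold target
  rw [List.flatMap_def, List.pairwise_flatten]
  constructor
  · intro l hl
    rcases List.mem_map.1 hl with ⟨lvl, _, rfl⟩
    have hpf : (strengthOrder.filter (fun c => (PySem.Dict.counter cs).get? c == some lvl)).Pairwise
        (fun a b => PySem.Chars.find strengthOrder [a] < PySem.Chars.find strengthOrder [b]) :=
      findPairwise.filter _
    refine hpf.imp_of_mem ?_
    intro a b ha hb hf
    have hga := (List.mem_filter.1 ha).2
    have hgb := (List.mem_filter.1 hb).2
    have hda : (PySem.Dict.counter cs).getD a 0 = lvl := by
      rw [PySem.Dict.getD_eq_get?_getD, (beq_iff_eq).1 hga]; rfl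
    have hdb : (PySem.Dict.counter cs).getD b 0 = lvl := by
      rw [PySem.Dict.getD_eq_get?_getD, (beq_iff_eq).1 hgb]; rfl
    unfold combKey
    rw [hda, hdb]
    omega
  · have hlv : (PySem.List.pyRange top 0 (-1)).Pairwise (fun a b => b < a) := by
      rw [PySem.List.pyRange_neg_one_eq_reverse, List.pairwise_reverse]
      exact PySem.List.pairwise_lt_pyRange_one _ _
    rw [List.pairwise_map]
    refine hlv.imp_of_mem ?_
    intro lvl lvl' _ _ hlt a ha b hb
    have hma := List.mem_filter.1 ha
    have hmb := List.mem_filter.1 hb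
    have hda : (PySem.Dict.counter cs).getD a 0 = lvl := by
      rw [PySem.Dict.getD_eq_get?_getD, (beq_iff_eq).1 hma.2]; rfl
    have hdb : (PySem.Dict.counter cs).getD b 0 = lvl' := by
      rw [PySem.Dict.getD_eq_get?_getD, (beq_iff_eq).1 hmb.2]; rfl
    have hba := findBounds a hma.1
    have hbb := findBounds b hmb.1
    unfold combKey
    rw [hda, hdb]
    omega

lemma sorted2_eq_target (cs : List Char) (hpre : ∀ c ∈ cs, c ∈ strengthOrder) (hne : cs ≠ []) :
    PySem.List.sorted2 (PySem.Dict.counter cs).keys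
        (fun x => -((PySem.Dict.counter cs).getD x 0)) (fun x => PySem.Chars.find strengthOrder [x])
      = target (PySem.Dict.counter cs)
          ((PySem.List.max? (PySem.Dict.counter cs).values (fun v => v)).getD 0) := by
  have hkeys := PySem.Dict.keys_counter cs
  have hks : ∀ c ∈ (PySem.Dict.counter cs).keys, c ∈ strengthOrder := by
    intro c hc
    rw [hkeys] at hc
    exact hpre c ((PySem.Set.mem_ofList cs c).1 hc)
  rw [sorted2_eq_sorted_comb _ _ hks]
  obtain ⟨htop, _⟩ := top_facts cs hne
  have hpw := pairwise_target cs ((PySem.List.max? (PySem.Dict.counter cs).values (fun v => v)).getD 0)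
  have hnd_t : (target (PySem.Dict.counter cs) _).Nodup :=
    hpw.imp (fun {a b} h => fun heq => by subst heq; exact lt_irrefl _ h)
  have hnd_k : (PySem.Dict.counter cs).keys.Nodup := PySem.Dict.nodup_keys_counter cs
  apply PySem.List.sorted_eq_of_perm_of_pairwise_lt _ _ _ ?_ hpw
  rw [List.perm_ext_iff_of_nodup hnd_t hnd_k]
  intro a
  rw [hkeys]
  exact mem_target cs hpre _ htop a

set_option maxRecDepth 2000 in
lemma idx_eq : ∀ c ∈ strengthOrder, (PySem.Chars.find strengthOrder [c]).toNat = strengthOrder.idxOf c := by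
  intro c hc; fin_cases hc <;> decide

lemma set_map_idxOf (g : Char → List Char) (c : Char) (v : List Char) (hc : c ∈ strengthOrder) :
    (strengthOrder.map g).set (strengthOrder.idxOf c) v
      = strengthOrder.map (fun x => if x = c then v else g x) := by
  have hnd : strengthOrder.Nodup := by decide
  have hlt : strengthOrder.idxOf c < strengthOrder.length := List.idxOf_lt_length_iff.2 hc
  apply List.ext_getElem (by simp)
  intro j h1 h2
  have hj : j < strengthOrder.length := by simpa using h2
  rw [List.getElem_set]
  simp only [List.getElem_map]
  by_cases hij : strengthOrder.idxOf c = j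
  · rw [if_pos hij]
    subst hij
    rw [List.getElem_idxOf hlt, if_pos rfl]
  · rw [if_neg hij]
    have : strengthOrder[j] ≠ c := by
      intro he
      apply hij
      have h2' : strengthOrder[strengthOrder.idxOf c] = c := List.getElem_idxOf hlt
      exact (hnd.getElem_inj_iff.1 (h2'.trans he.symm)).symm ▸ rfl
    rw [if_neg this]

lemma foldl_set_buckets (ps : List (Char × Int)) (g : Char → List Char)
    (hmem : ∀ p ∈ ps, p.1 ∈ strengthOrder) :
    ps.foldl (fun b p =>
        b.set (PySem.Chars.find strengthOrder [p.1]).toNat (PySem.List.pyRepeat [p.1] p.2))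
      (strengthOrder.map g)
      = strengthOrder.map (fun c =>
          ps.foldl (fun acc p => if c = p.1 then PySem.List.pyRepeat [p.1] p.2 else acc) (g c)) := by
  induction ps generalizing g with
  | nil => simp
  | cons p ps ih =>
    simp only [List.foldl_cons]
    rw [idx_eq p.1 (hmem p (by simp)), set_map_idxOf g p.1 _ (hmem p (by simp))]
    rw [ih _ (fun q hq => hmem q (by simp [hq]))]

lemma inner_fold (cs : List Char) (c : Char) (K' : List Char) (a : List Char) :
    (K'.map (fun k => (k, (cs.count k : Int)))).foldl
      (fun acc p => if c = p.1 then PySem.List.pyRepeat [p.1] p.2 else acc) a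
      = if c ∈ K' then PySem.List.pyRepeat [c] (cs.count c) else a := by
  induction K' generalizing a with
  | nil => simp
  | cons k K' ih =>
    simp only [List.map_cons, List.foldl_cons]
    rw [ih]
    by_cases hmem : c ∈ K' <;> by_cases hck : c = k <;>
      simp [hmem, hck, List.mem_cons]

lemma buckets_eq (cs : List Char) (hpre : ∀ c ∈ cs, c ∈ strengthOrder) :
    (PySem.Dict.counter cs).items.foldl (fun b p =>
        b.set (PySem.Chars.find strengthOrder [p.1]).toNat (PySem.List.pyRepeat [p.1] p.2))
      (List.replicate strengthOrder.length [])
      = strengthOrder.map (fun c =>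
          if c ∈ PySem.Set.ofList cs then PySem.List.pyRepeat [c] (cs.count c) else []) := by
  rw [show (List.replicate strengthOrder.length ([] : List Char))
      = strengthOrder.map (fun _ => []) from (List.map_const).symm]
  rw [PySem.Dict.items_counter]
  rw [foldl_set_buckets _ _ (by
    intro p hp
    rcases List.mem_map.1 hp with ⟨k, hk, rfl⟩
    exact hpre _ ((PySem.Set.mem_ofList cs k).1 hk))]
  apply List.map_congr_left
  intro c _
  rw [inner_fold]

-- condition rewrite within one level
lemma len_cond_eq (cs : List Char) (lvl : Int) (hlvl : 0 < lvl) (c : Char) :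
    (PySem.List.len (if c ∈ PySem.Set.ofList cs then PySem.List.pyRepeat [c] (cs.count c) else []) == lvl)
      = ((PySem.Dict.counter cs).get? c == some lvl) := by
  by_cases hc : c ∈ PySem.Set.ofList cs
  · rw [if_pos hc]
    have hg : (PySem.Dict.counter cs).get? c = some (cs.count c : Int) :=
      (get?_counter_eq cs c _).2 ⟨hc, rfl⟩
    rw [hg, PySem.List.pyRepeat_singleton, PySem.List.len_eq]
    simp only [List.length_replicate]
    have : ((Int.toNat (cs.count c) : Int)) = (cs.count c : Int) := by omega
    rw [this]
    simp
  · rw [if_neg hc]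
    have hg : (PySem.Dict.counter cs).get? c = none := by
      rw [PySem.Dict.get?_eq_none_iff_not_mem_keys, PySem.Dict.keys_counter]
      exact hc
    rw [hg, PySem.List.len_eq]
    simp only [List.length_nil, Nat.cast_zero]
    have : ((0 : Int) == lvl) = false := by simp; omega
    rw [this]; rfl

lemma out_eq (cs : List Char) (hpre : ∀ c ∈ cs, c ∈ strengthOrder) (top : Int) :
    (PySem.List.pyRange top 0 (-1)).foldl (fun acc lvl =>
        ((PySem.Dict.counter cs).items.foldl (fun b p =>
            b.set (PySem.Chars.find strengthOrder [p.1]).toNat (PySem.List.pyRepeat [p.1] p.2))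
          (List.replicate strengthOrder.length [])).foldl
          (fun acc piece => if PySem.List.len piece == lvl then acc ++ [piece] else acc) acc) []
      = (target (PySem.Dict.counter cs) top).map
          (fun c => PySem.List.pyRepeat [c] ((PySem.Dict.counter cs).getD c 0)) := by
  rw [buckets_eq cs hpre]
  have hinner : ∀ (acc : List (List Char)) (lvl : Int), lvl ∈ PySem.List.pyRange top 0 (-1) →
      (strengthOrder.map (fun c =>
          if c ∈ PySem.Set.ofList cs then PySem.List.pyRepeat [c] (cs.count c) else [])).foldl
        (fun acc piece => if PySem.List.len piece == lvl then acc ++ [piece] else acc) acc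
      = acc ++ (strengthOrder.filter (fun c => (PySem.Dict.counter cs).get? c == some lvl)).map
          (fun c => PySem.List.pyRepeat [c] ((PySem.Dict.counter cs).getD c 0)) := by
    intro acc lvl hl
    have hlvl : 0 < lvl := (PySem.List.mem_pyRange_neg_one.1 hl).1
    rw [PySem.List.foldl_append_if_eq_filter]
    rw [List.filter_map]
    congr 1
    have hcond : (strengthOrder.filter ((fun piece => PySem.List.len piece == lvl) ∘ (fun c =>
        if c ∈ PySem.Set.ofList cs then PySem.List.pyRepeat [c] (cs.count c) else [])))
        = strengthOrder.filter (fun c => (PySem.Dict.counter cs).get? c == some lvl) :=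
      List.filter_congr (fun c _ => len_cond_eq cs lvl hlvl c)
    rw [hcond]
    apply List.map_congr_left
    intro c hcf
    have hg := (List.mem_filter.1 hcf).2
    have := (get?_counter_eq cs c lvl).1 ((beq_iff_eq).1 hg)
    rw [if_pos this.1, PySem.Dict.getD_counter, this.2]
  calc (PySem.List.pyRange top 0 (-1)).foldl (fun acc lvl =>
        (strengthOrder.map (fun c =>
            if c ∈ PySem.Set.ofList cs then PySem.List.pyRepeat [c] (cs.count c) else [])).foldl
          (fun acc piece => if PySem.List.len piece == lvl then acc ++ [piece] else acc) acc) []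
      = (PySem.List.pyRange top 0 (-1)).foldl (fun acc lvl =>
          acc ++ (strengthOrder.filter (fun c => (PySem.Dict.counter cs).get? c == some lvl)).map
            (fun c => PySem.List.pyRepeat [c] ((PySem.Dict.counter cs).getD c 0))) [] :=
        PySem.List.foldl_congr_mem _ _ _ _ (fun acc lvl hl => hinner acc lvl hl)
    _ = [] ++ (PySem.List.pyRange top 0 (-1)).flatMap (fun lvl =>
          (strengthOrder.filter (fun c => (PySem.Dict.counter cs).get? c == some lvl)).map
            (fun c => PySem.List.pyRepeat [c] ((PySem.Dict.counter cs).getD c 0))) :=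
        PySem.List.foldl_append_eq_flatMap _ _ _
    _ = (target (PySem.Dict.counter cs) top).map
          (fun c => PySem.List.pyRepeat [c] ((PySem.Dict.counter cs).getD c 0)) := by
        rw [target, List.map_flatMap]
        rfl

theorem sort_by_frequency_and_strength_equal_aux (s : String)
    (hpre : ∀ c ∈ s.toList, c ∈ strengthOrder) :
    sort_by_frequency_and_strength s = sort_by_frequency_and_strength_alt s := by
  unfold sort_by_frequency_and_strength sort_by_frequency_and_strength_alt
  rw [countA_eq]
  rw [show (s.toList.foldl (fun d ch => d.insert ch (d.getD ch 0 + 1)) PySem.Dict.empty : PySem.Dict Char Int) = PySem.Dict.counter s.toList from rfl]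
  dsimp only
  by_cases h : s.toList = []
  · rw [h]; rfl
  · have hsz : (PySem.Dict.counter s.toList).size ≠ 0 := by
      have : (PySem.Dict.counter s.toList).keys ≠ [] := by
        rw [PySem.Dict.keys_counter]
        rcases List.exists_mem_of_ne_nil _ h with ⟨x, hx⟩
        intro he
        have := (PySem.Set.mem_ofList s.toList x).2 hx
        simp [he] at this
      simpa [PySem.Dict.size, PySem.Dict.keys] using fun hc => this (by simp [PySem.Dict.keys, hc])
    rw [if_neg hsz]
    have hout := out_eq s.toList hpre
      ((PySem.List.max? (PySem.Dict.counter s.toList).values (fun v => v)).getD 0)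
    rw [hout]
    rw [sorted2_eq_target s.toList hpre h]

-- ===== VERDICT (by name: the statements are the Claim_ definitions above) =====
theorem sort_by_frequency_and_strength_spec : Claim_equal_sort_by_frequency_and_strength := by
  intro s _ hpre
  unfold Spec_sort_by_frequency_and_strength
  refine sort_by_frequency_and_strength_equal_aux s ?_
  intro c hc
  simpa using List.all_eq_true.1 hpre c hc
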